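-- pv_equiv track=rewrite | github.com/BogyMitutoyoCTL/Snake-AI-2021.1 | code/Algorithms/MachineLearningTW.py | berechne_im_binaersystem
-- ===== SOURCE A (Python) =====
-- def berechne_im_binaersystem(ausschnitt, maske):
--     situationsnummer = 0  # Identitäts-Element für Addition
--     wertigkeit = 1  # Identitäts-Element für Multiplikation
--     anzahl_ziffern = len(ausschnitt)
--     for stelle in range(0, anzahl_ziffern):
--         muss_beruecksichtigt_werden = maske[stelle]
--         if muss_beruecksichtigt_werden == "1":
--             ziffer = ausschnitt[stelle]
--             situationsnummer += ziffer * wertigkeit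
--             wertigkeit *= 2  # Binärsystem
--     return situationsnummer
-- ===== SOURCE B (Python) =====
-- def berechne_im_binaersystem(ausschnitt, maske):
--     bits = [ausschnitt[i] for i in range(len(ausschnitt)) if maske[i] == "1"]
--     acc = 0
--     for d in reversed(bits):
--         acc = acc * 2 + d
--     return acc
-- ===== Notes on version B (the rewrite author's own statement) =====
-- stated objective: alternative
-- what changed: Replaces the single loop carrying a doubling weight accumulator with two phases: first collect the mask-selected digits, then combine them most-significant-first with a Horner multiply-accumulate fold.
import Mathlib
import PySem

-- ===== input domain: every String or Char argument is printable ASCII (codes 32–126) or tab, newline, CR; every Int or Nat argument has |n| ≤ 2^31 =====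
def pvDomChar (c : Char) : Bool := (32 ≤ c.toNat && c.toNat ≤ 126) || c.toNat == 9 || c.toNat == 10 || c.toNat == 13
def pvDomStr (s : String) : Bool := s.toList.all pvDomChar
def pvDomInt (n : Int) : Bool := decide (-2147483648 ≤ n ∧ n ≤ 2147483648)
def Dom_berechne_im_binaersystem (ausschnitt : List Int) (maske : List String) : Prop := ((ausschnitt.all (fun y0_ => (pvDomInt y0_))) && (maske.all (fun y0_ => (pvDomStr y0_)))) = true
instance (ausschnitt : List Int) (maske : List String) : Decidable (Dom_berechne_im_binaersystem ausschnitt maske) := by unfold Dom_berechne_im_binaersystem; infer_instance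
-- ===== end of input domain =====

-- B splits the computation in two phases (select digits, then a Horner fold) instead of one
-- weighted loop; alternative decomposition of the same O(n) task.

-- ===== PORT A =====
def berechne_im_binaersystem (ausschnitt : List Int) (maske : List String) : Int :=
  (List.foldl
    (fun (st : Int × Int) (stelle : Int) =>
      if (PySem.List.pyGet? maske stelle).getD "" == "1" then
        (st.1 + ((PySem.List.pyGet? ausschnitt stelle).getD 0) * st.2, st.2 * 2)
      else st)
    (0, 1)
    (PySem.List.pyRange 0 (ausschnitt.length : Int) 1)).1

-- ===== PORT B =====
def berechne_im_binaersystem_alt (ausschnitt : List Int) (maske : List String) : Int :=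
  let bits : List Int :=
    ((PySem.List.pyRange 0 (ausschnitt.length : Int) 1).filter
        (fun i => (PySem.List.pyGet? maske i).getD "" == "1")).map
      (fun i => (PySem.List.pyGet? ausschnitt i).getD 0)
  bits.reverse.foldl (fun acc d => acc * 2 + d) 0

-- ===== PRECONDITION & SPEC =====
-- Pre_ excludes exactly the inputs where Python A raises IndexError (mask shorter than the digit list).
def Pre_berechne_im_binaersystem (ausschnitt : List Int) (maske : List String) : Prop :=
  ausschnitt.length ≤ maske.length
instance (ausschnitt : List Int) (maske : List String) : Decidable (Pre_berechne_im_binaersystem ausschnitt maske) := by unfold Pre_berechne_im_binaersystem; infer_instance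
def pvWitness_berechne_im_binaersystem : List Int × List String := ([1, 0, 1], ["1", "0", "1"])

def Spec_berechne_im_binaersystem (ausschnitt : List Int) (maske : List String) (out : Int) : Prop := out = berechne_im_binaersystem_alt ausschnitt maske
instance (ausschnitt : List Int) (maske : List String) (out : Int) : Decidable (Spec_berechne_im_binaersystem ausschnitt maske out) := by unfold Spec_berechne_im_binaersystem; infer_instance

-- ===== CLAIM (what is proved, stated in full; the proofs are below) =====
def Claim_equal_berechne_im_binaersystem : Prop := ∀ (ausschnitt : List Int) (maske : List String), Dom_berechne_im_binaersystem ausschnitt maske → Pre_berechne_im_binaersystem ausschnitt maske → Spec_berechne_im_binaersystem ausschnitt maske (berechne_im_binaersystem ausschnitt maske)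

-- ===== LEMMAS AND PROOFS =====


-- val l = value of digit list l, least significant first
def pvVal : List Int → Int
  | [] => 0
  | d :: t => d + 2 * pvVal t

theorem pvHorner_eq (l : List Int) :
    l.reverse.foldl (fun acc d => acc * 2 + d) 0 = pvVal l := by
  rw [List.foldl_reverse]
  induction l with
  | nil => rfl
  | cons d t ih => simp [pvVal, ih]; ring

theorem pvFold_eq (l : List Int) : ∀ (s w : Int),
    (l.foldl (fun (st : Int × Int) d => (st.1 + d * st.2, st.2 * 2)) (s, w)).1
      = s + w * pvVal l := by
  induction l with
  | nil => intro s w; simp [pvVal]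
  | cons d t ih => intro s w; simp [List.foldl, pvVal, ih]; ring

theorem pvFilter_fold (c : Int → Bool) (f : Int → Int) :
    ∀ (I : List Int) (st : Int × Int),
    I.foldl (fun (st : Int × Int) i =>
        if c i then (st.1 + f i * st.2, st.2 * 2) else st) st
      = ((I.filter c).map f).foldl
          (fun (st : Int × Int) d => (st.1 + d * st.2, st.2 * 2)) st := by
  intro I
  induction I with
  | nil => intro st; rfl
  | cons i t ih =>
    intro st
    by_cases h : c i <;> simp [List.foldl, List.filter, h, ih]

-- ===== VERDICT (by name: the statement is the Claim_ definition above) =====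
theorem berechne_im_binaersystem_spec : Claim_equal_berechne_im_binaersystem := by
  intro ausschnitt maske _ _
  unfold Spec_berechne_im_binaersystem berechne_im_binaersystem berechne_im_binaersystem_alt
  rw [pvHorner_eq, pvFilter_fold, pvFold_eq]
  ring
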